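-- pv_equiv track=rewrite | github.com/sejjiin/game-stats | baseless.py | get_coins
-- ===== SOURCE A (Python) =====
-- def get_coins(plays: list[int]) -> dict[str, int]:
--     """Returns coin base statistics.
--
--     Returns number of games that have been played 5 (nickel), 10 (dime),
--     25 (quarter), etc. times.
--
--     Args:
--         plays: a list of integers where each cell indicates a play count of a game.
--     """
--     nickels = 0
--     dimes = 0
--     quarters = 0
--     halves = 0
--     dollars = 0
--     for play in plays:
--         if play >= 100:
--             dollars += 1
--         elif play >= 50:
--             halves += 1
--         elif play >= 25:
--             quarters += 1
--         elif play >= 10: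
--             dimes += 1
--         elif play >= 5:
--             nickels += 1
--
--     return {'nickels': nickels, 'dimes': dimes, 'quarters': quarters,
--             'halves': halves, 'dollars': dollars}
-- ===== SOURCE B (Python) =====
-- def get_coins(plays: list[int]) -> dict[str, int]:
--     """Returns coin base statistics (cumulative-count decomposition)."""
--     def count_ge(t):
--         return sum(1 for p in plays if p >= t)
--     g5, g10, g25, g50, g100 = count_ge(5), count_ge(10), count_ge(25), count_ge(50), count_ge(100)
--     return {'nickels': g5 - g10, 'dimes': g10 - g25, 'quarters': g25 - g50,
--             'halves': g50 - g100, 'dollars': g100}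
-- ===== Notes on version B (the rewrite author's own statement) =====
-- stated objective: alternative
-- what changed: Replaces the single elif-chain bucketing loop over five mutable counters by five cumulative count_ge(t) tallies (number of plays >= t) whose pairwise differences give each coin tier.
import Mathlib
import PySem

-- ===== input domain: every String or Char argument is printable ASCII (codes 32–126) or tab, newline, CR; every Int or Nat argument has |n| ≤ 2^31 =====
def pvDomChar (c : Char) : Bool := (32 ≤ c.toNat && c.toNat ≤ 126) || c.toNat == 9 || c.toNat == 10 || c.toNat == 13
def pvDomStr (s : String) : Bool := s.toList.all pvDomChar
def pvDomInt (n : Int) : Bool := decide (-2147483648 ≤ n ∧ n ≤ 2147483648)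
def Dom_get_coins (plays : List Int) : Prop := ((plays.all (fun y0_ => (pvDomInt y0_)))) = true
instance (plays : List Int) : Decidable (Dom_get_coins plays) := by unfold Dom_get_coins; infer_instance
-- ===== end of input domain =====

-- B replaces A's single elif-chain bucketing loop by five cumulative count_ge tallies
-- whose differences give each tier (alternative decomposition, same O(n) cost).

-- ===== PORT A =====
-- the body of A's for-loop (the elif chain over the five counters)
def pvStepA (s : Int × Int × Int × Int × Int) (play : Int) : Int × Int × Int × Int × Int :=
  if play ≥ 100 then (s.1, s.2.1, s.2.2.1, s.2.2.2.1, s.2.2.2.2 + 1)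
  else if play ≥ 50 then (s.1, s.2.1, s.2.2.1, s.2.2.2.1 + 1, s.2.2.2.2)
  else if play ≥ 25 then (s.1, s.2.1, s.2.2.1 + 1, s.2.2.2.1, s.2.2.2.2)
  else if play ≥ 10 then (s.1, s.2.1 + 1, s.2.2.1, s.2.2.2.1, s.2.2.2.2)
  else if play ≥ 5 then (s.1 + 1, s.2.1, s.2.2.1, s.2.2.2.1, s.2.2.2.2)
  else s

def get_coins (plays : List Int) : List (String × Int) :=
  let r := plays.foldl pvStepA (0, 0, 0, 0, 0)
  [("nickels", r.1), ("dimes", r.2.1), ("quarters", r.2.2.1),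
   ("halves", r.2.2.2.1), ("dollars", r.2.2.2.2)]

-- ===== PORT B =====
-- count_ge(t) = sum(1 for p in plays if p >= t)
def pvCountGe (plays : List Int) (t : Int) : Int :=
  plays.foldl (fun acc p => if p ≥ t then acc + 1 else acc) 0

def get_coins_alt (plays : List Int) : List (String × Int) :=
  let g5 := pvCountGe plays 5
  let g10 := pvCountGe plays 10
  let g25 := pvCountGe plays 25
  let g50 := pvCountGe plays 50
  let g100 := pvCountGe plays 100
  [("nickels", g5 - g10), ("dimes", g10 - g25), ("quarters", g25 - g50),
   ("halves", g50 - g100), ("dollars", g100)]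

-- ===== PRECONDITION & SPEC =====
def Spec_get_coins (plays : List Int) (out : List (String × Int)) : Prop := out = get_coins_alt plays
instance (plays : List Int) (out : List (String × Int)) : Decidable (Spec_get_coins plays out) := by unfold Spec_get_coins; infer_instance

-- ===== CLAIM (what is proved, stated in full; the proofs are below) =====
def Claim_equal_get_coins : Prop := ∀ (plays : List Int), Dom_get_coins plays → Spec_get_coins plays (get_coins plays)

-- ===== LEMMAS AND PROOFS =====

theorem pvCountGe_eq_countP (plays : List Int) (t : Int) :
    pvCountGe plays t = (plays.countP (fun p => decide (p ≥ t)) : Int) := by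
  simpa using PySem.List.foldl_if_add_one (fun p => decide (p ≥ t)) plays 0

theorem pvCountGe_cons (p : Int) (rest : List Int) (t : Int) :
    pvCountGe (p :: rest) t = (if p ≥ t then 1 else 0) + pvCountGe rest t := by
  simp only [pvCountGe_eq_countP, List.countP_cons]
  split_ifs with h <;> simp_all <;> omega

-- A's fold, with all five accumulators generalized, expressed via pvCountGe differences.
theorem pv_foldA_eq (plays : List Int) (n d q h dol : Int) :
    plays.foldl pvStepA (n, d, q, h, dol)
    = (n + (pvCountGe plays 5 - pvCountGe plays 10),
       d + (pvCountGe plays 10 - pvCountGe plays 25),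
       q + (pvCountGe plays 25 - pvCountGe plays 50),
       h + (pvCountGe plays 50 - pvCountGe plays 100),
       dol + pvCountGe plays 100) := by
  induction plays generalizing n d q h dol with
  | nil => simp [pvCountGe]
  | cons p rest ih =>
      simp only [List.foldl_cons, pvCountGe_cons, pvStepA]
      split_ifs with h1 h2 h3 h4 h5 <;> rw [ih] <;>
        refine Prod.ext ?_ (Prod.ext ?_ (Prod.ext ?_ (Prod.ext ?_ ?_))) <;>
        simp <;> omega

-- ===== VERDICT (by name: the statement is the Claim_ definition above) =====
theorem get_coins_spec : Claim_equal_get_coins := by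
  intro plays _
  unfold Spec_get_coins get_coins get_coins_alt
  simp [pv_foldA_eq]
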